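-- pv_equiv track=rewrite | github.com/Jiazhen-Hong/SpellerSSL-NeurIPS2025 | utility/Aggregation.py | extract_stimulus_cycles_from_code
-- ===== SOURCE A (Python) =====
-- def extract_stimulus_cycles_from_code(stim_code_row):
--     flashes, cycle_list, count = [], [], 0
--     idx = 0
--     while idx < len(stim_code_row):
--         val = int(stim_code_row[idx])
--         if val != 0:
--             flashes.append(val)
--             count += 1
--             while idx + 1 < len(stim_code_row) and int(stim_code_row[idx + 1]) == val:
--                 idx += 1
--             if count == 12:
--                 cycle_list.append(flashes)
--                 flashes, count = [], 0
--         idx += 1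
--     return cycle_list  # len==15, each sublist has len==12
-- ===== SOURCE B (Python) =====
-- from itertools import groupby
--
-- def extract_stimulus_cycles_from_code(stim_code_row):
--     flashes = [k for k, _ in groupby(int(v) for v in stim_code_row) if k != 0]
--     n = len(flashes) // 12
--     return [flashes[i * 12:(i + 1) * 12] for i in range(n)]
-- ===== Notes on version B (the rewrite author's own statement) =====
-- stated objective: idiomatic
-- what changed: A's single fused scan with an inner lookahead loop and an incremental flush-every-12 accumulator is replaced by a two-stage pipeline: itertools.groupby collapses consecutive-equal codes into a flat nonzero flash list, then slicing partitions it into complete cycles of 12.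
import Mathlib
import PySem

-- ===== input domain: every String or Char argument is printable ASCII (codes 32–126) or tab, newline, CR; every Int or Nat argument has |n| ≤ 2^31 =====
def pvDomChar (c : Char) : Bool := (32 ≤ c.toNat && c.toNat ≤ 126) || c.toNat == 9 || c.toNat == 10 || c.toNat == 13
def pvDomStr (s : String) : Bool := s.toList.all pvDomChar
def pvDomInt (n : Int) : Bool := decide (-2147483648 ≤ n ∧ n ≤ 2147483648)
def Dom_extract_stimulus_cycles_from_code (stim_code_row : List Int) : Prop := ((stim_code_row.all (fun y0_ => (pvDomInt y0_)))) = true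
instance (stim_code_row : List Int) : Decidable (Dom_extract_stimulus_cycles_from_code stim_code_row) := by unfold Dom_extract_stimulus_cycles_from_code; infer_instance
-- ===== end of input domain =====

-- B restructures A's fused flush-every-12 scan into two stages (collapse consecutive runs via groupby, then chunk by 12); objective: idiomatic. Equal return value on every input (both are total).

-- ===== PORT A =====
-- inner 'while idx + 1 < len and int(row[idx+1]) == val: idx += 1'
def skipA (xs : List Int) (idx : Nat) (val : Int) : Nat :=
  if idx + 1 < xs.length ∧ xs.getD (idx + 1) 0 = val then skipA xs (idx + 1) val else idx
termination_by xs.length - idx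
decreasing_by omega

theorem le_skipA (xs : List Int) (idx : Nat) (val : Int) : idx ≤ skipA xs idx val := by
  fun_induction skipA with
  | case1 idx h ih => exact le_trans (Nat.le_succ idx) ih
  | case2 idx h => exact le_refl idx

-- outer while loop of A
def loopA (xs : List Int) (idx : Nat) (flashes : List Int) (count : Nat)
    (cycles : List (List Int)) : List (List Int) :=
  if h : idx < xs.length then
    let val := xs.getD idx 0          -- int(row[idx]); idx is in range here
    if val ≠ 0 then
      let idx' := skipA xs idx val
      if count + 1 = 12 then
        loopA xs (idx' + 1) [] 0 (cycles ++ [flashes ++ [val]])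
      else
        loopA xs (idx' + 1) (flashes ++ [val]) (count + 1) cycles
    else
      loopA xs (idx + 1) flashes count cycles
  else cycles
termination_by xs.length - idx
decreasing_by
  · have := le_skipA xs idx (xs.getD idx 0); omega
  · have := le_skipA xs idx (xs.getD idx 0); omega
  · omega

def extract_stimulus_cycles_from_code (stim_code_row : List Int) : List (List Int) :=
  loopA stim_code_row 0 [] 0 []

-- ===== PORT B =====
-- keys of itertools.groupby: collapse consecutive equal values
def dedupKeys : List Int → List Int
  | [] => []
  | a :: rest => a :: dedupKeys (rest.dropWhile (· == a))
termination_by l => l.length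
decreasing_by
  have := List.length_dropWhile_le (· == a) rest
  simp; omega

-- [flashes[i*12:(i+1)*12] for i in range(len(flashes)//12)]
def chunksB (l : List Int) : List (List Int) :=
  (List.range (l.length / 12)).map
    (fun i => PySem.List.slice l (some ((i * 12 : Nat) : Int)) (some (((i + 1) * 12 : Nat) : Int)))

def extract_stimulus_cycles_from_code_alt (stim_code_row : List Int) : List (List Int) :=
  chunksB ((dedupKeys stim_code_row).filter (· ≠ 0))

-- ===== PRECONDITION & SPEC =====
def Spec_extract_stimulus_cycles_from_code (stim_code_row : List Int) (out : List (List Int)) : Prop := out = extract_stimulus_cycles_from_code_alt stim_code_row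
instance (stim_code_row : List Int) (out : List (List Int)) : Decidable (Spec_extract_stimulus_cycles_from_code stim_code_row out) := by unfold Spec_extract_stimulus_cycles_from_code; infer_instance

-- ===== CLAIM (what is proved, stated in full; the proofs are below) =====
def Claim_equal_extract_stimulus_cycles_from_code : Prop := ∀ (stim_code_row : List Int), Dom_extract_stimulus_cycles_from_code stim_code_row → Spec_extract_stimulus_cycles_from_code stim_code_row (extract_stimulus_cycles_from_code stim_code_row)

-- ===== LEMMAS AND PROOFS =====

-- the flash values A emits, read off the remaining suffix
def flashStream : List Int → List Int
  | [] => []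
  | a :: rest =>
      if a ≠ 0 then a :: flashStream (rest.dropWhile (· == a)) else flashStream rest
termination_by l => l.length
decreasing_by
  · have := List.length_dropWhile_le (· == a) rest
    simp; omega
  · simp

-- A's incremental flush of the flash stream into 12-cycles
def feed (fl : List Int) (c : Nat) (cy : List (List Int)) : List Int → List (List Int)
  | [] => cy
  | v :: rest =>
      if c + 1 = 12 then feed [] 0 (cy ++ [fl ++ [v]]) rest
      else feed (fl ++ [v]) (c + 1) cy rest

theorem skipA_drop (xs : List Int) (idx : Nat) (val : Int) :
    xs.drop (skipA xs idx val + 1) = (xs.drop (idx + 1)).dropWhile (· == val) := by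
  fun_induction skipA with
  | case1 idx h ih =>
      obtain ⟨hlt, heq⟩ := h
      have hv : xs[idx + 1] = val := by rw [← List.getD_eq_getElem xs 0 hlt]; exact heq
      rw [ih, List.drop_eq_getElem_cons hlt,
        List.dropWhile_cons_of_pos (by simp [hv])]
  | case2 idx h =>
      rcases Nat.lt_or_ge (idx + 1) xs.length with hlt | hge
      · have hv : xs[idx + 1] ≠ val := by
          rw [← List.getD_eq_getElem xs 0 hlt]; tauto
        rw [List.drop_eq_getElem_cons hlt,
          List.dropWhile_cons_of_neg (by simp [hv])]
      · rw [List.drop_eq_nil_of_le hge, List.dropWhile_nil]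

theorem loopA_eq_feed (xs : List Int) (idx : Nat) (fl : List Int) (c : Nat)
    (cy : List (List Int)) :
    loopA xs idx fl c cy = feed fl c cy (flashStream (xs.drop idx)) := by
  fun_induction loopA with
  | case1 idx fl c cy h val hv idx' hc ih =>
      have hi : idx' = skipA xs idx val := rfl
      rw [ih, hi, skipA_drop]
      have hg : val = xs[idx] := List.getD_eq_getElem xs 0 h
      rw [List.drop_eq_getElem_cons h, flashStream, ← hg, if_pos hv, feed, if_pos hc]
  | case2 idx fl c cy h val hv idx' hc ih =>
      have hi : idx' = skipA xs idx val := rfl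
      rw [ih, hi, skipA_drop]
      have hg : val = xs[idx] := List.getD_eq_getElem xs 0 h
      rw [List.drop_eq_getElem_cons h, flashStream, ← hg, if_pos hv, feed, if_neg hc]
  | case3 idx fl c cy h val hv ih =>
      rw [ih]
      have hg : val = xs[idx] := List.getD_eq_getElem xs 0 h
      rw [List.drop_eq_getElem_cons h, flashStream, ← hg, if_neg hv]
  | case4 idx fl c cy h =>
      rw [List.drop_eq_nil_of_le (by omega), flashStream, feed]

theorem flashStream_dropWhile_zero (l : List Int) :
    flashStream (l.dropWhile (· == (0 : Int))) = flashStream l := by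
  induction l with
  | nil => simp
  | cons a rest ih =>
      by_cases ha : a = 0
      · subst ha
        rw [List.dropWhile_cons]
        simpa [flashStream] using ih
      · rw [List.dropWhile_cons]
        simp [ha]

theorem flashStream_eq_filter_dedup (l : List Int) :
    flashStream l = (dedupKeys l).filter (· ≠ 0) := by
  fun_induction dedupKeys with
  | case1 => rw [flashStream, List.filter_nil]
  | case2 a rest ih =>
      by_cases ha : a = 0
      · subst ha
        rw [flashStream, if_neg (by simp), List.filter_cons_of_neg (by simp),
          ← ih, flashStream_dropWhile_zero]
      · rw [flashStream, if_pos ha, List.filter_cons_of_pos (by simp [ha]), ih]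

theorem chunksB_nil_of_short (l : List Int) (h : l.length < 12) : chunksB l = [] := by
  unfold chunksB
  have : l.length / 12 = 0 := by omega
  simp [this]

theorem chunksB_cons (c s : List Int) (hc : c.length = 12) :
    chunksB (c ++ s) = c :: chunksB s := by
  unfold chunksB
  have hlen : (c ++ s).length / 12 = s.length / 12 + 1 := by
    simp only [List.length_append, hc]
    omega
  rw [hlen, List.range_succ_eq_map, List.map_cons, List.map_map]
  congr 1
  · rw [PySem.List.slice_natCast]
    norm_num
    exact List.take_left' hc
  · apply List.map_congr_left
    intro i _
    simp only [Function.comp_apply]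
    rw [PySem.List.slice_natCast, PySem.List.slice_natCast]
    have h1 : (i + 1) * 12 - i * 12 = 12 := by omega
    have h2 : (i + 1 + 1) * 12 - (i + 1) * 12 = 12 := by omega
    rw [h1, h2]
    congr 1
    rw [show (i + 1) * 12 = c.length + i * 12 by omega, ← List.drop_drop,
      List.drop_left' rfl]

theorem feed_eq_chunksB (s fl : List Int) (cy : List (List Int)) (h : fl.length < 12) :
    feed fl fl.length cy s = cy ++ chunksB (fl ++ s) := by
  induction s generalizing fl cy with
  | nil =>
      rw [feed, List.append_nil, chunksB_nil_of_short fl h, List.append_nil]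
  | cons v rest ih =>
      rw [feed]
      by_cases h12 : fl.length + 1 = 12
      · rw [if_pos h12]
        have h' := ih [] (cy ++ [fl ++ [v]]) (by norm_num)
        simp only [List.length_nil, List.nil_append] at h'
        rw [h', show fl ++ v :: rest = (fl ++ [v]) ++ rest from by simp,
          chunksB_cons _ _ (by simp; omega), List.append_assoc, List.singleton_append]
      · rw [if_neg h12]
        have hlen : (fl ++ [v]).length = fl.length + 1 := by simp
        have h' := ih (fl ++ [v]) cy (by omega)
        rw [hlen] at h'
        rw [h', show (fl ++ [v]) ++ rest = fl ++ v :: rest from by simp]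

-- ===== VERDICT (by name: the statement is the Claim_ definition above) =====
theorem extract_stimulus_cycles_from_code_spec : Claim_equal_extract_stimulus_cycles_from_code := by
  intro xs _
  unfold Spec_extract_stimulus_cycles_from_code
  unfold extract_stimulus_cycles_from_code extract_stimulus_cycles_from_code_alt
  rw [loopA_eq_feed]
  simp only [List.drop_zero]
  have := feed_eq_chunksB (flashStream xs) [] [] (by simp)
  simp only [List.length_nil, List.nil_append] at this
  rw [this, flashStream_eq_filter_dedup]
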